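-- pv_equiv track=rewrite | github.com/DylanWRh/Tractor-Project | utils.py | is_normal
-- ===== SOURCE A (Python) =====
-- def is_normal(cards, level):
--     '''cards: List[str], level: str'''
--
--     mappings = {
--         '2': 2,
--         '3': 3,
--         '4': 4,
--         '5': 5,
--         '6': 6,
--         '7': 7,
--         '8': 8,
--         '9': 9,
--         '0': 10,
--         'J': 11,
--         'Q': 12,
--         'K': 13,
--         'A': 14
--     }
--
--     if (len(cards)) < 1:
--         return False
--     # 单牌的情况
--     if len(cards) == 1:
--         return True
--     # 对子的情况
--     if len(cards) == 2:
--         return cards[0] == cards[1]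
--     # 连对的情况
--     if len(cards) > 2:
--         if len(cards) % 2 != 0:
--             return False
--         # 级牌和大小王不参与构成拖拉机
--         for card in cards:
--             if (level in card) or ('jo' in card) or ('Jo' in card):
--                 return False
--         # 拖拉机花色相等
--         for card in cards:
--             if card[0] != cards[0][0]:
--                 return False
--         # 连对判断
--         # 统计各个牌的数量
--         card_numbers = [0 for i in range(15)]
--         for card in cards:
--             if card[1] not in mappings.keys():
--                 return False
--             card_numbers[mappings[card[1]]] += 1
--         if level not in mappings.keys():
--             return False
--         card_numbers.pop(mappings[level])
--
--         # 判断连对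
--         is_start = 0
--         while len(card_numbers) > 0:
--             cur_num = card_numbers.pop(0)
--             if cur_num not in [0, 2]:
--                 return False
--             if (cur_num == 2) and (is_start == 0):
--                 is_start = 1
--                 continue
--             if (cur_num == 0) and (is_start == 1):
--                 is_start = 2
--                 continue
--             if (cur_num != 0) and (is_start > 1):
--                 return False
--         if (is_start):
--             return True
--     return False
-- ===== SOURCE B (Python) =====
-- def is_normal(cards, level):
--     '''cards: List[str], level: str'''
--
--     mappings = {
--         '2': 2, '3': 3, '4': 4, '5': 5, '6': 6, '7': 7, '8': 8,
--         '9': 9, '0': 10, 'J': 11, 'Q': 12, 'K': 13, 'A': 14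
--     }
--
--     n = len(cards)
--     if n < 1:
--         return False
--     if n == 1:
--         return True
--     if n == 2:
--         return cards[0] == cards[1]
--     if n % 2 != 0:
--         return False
--     # level cards and jokers cannot be part of a tractor
--     if any((level in card) or ('jo' in card) or ('Jo' in card) for card in cards):
--         return False
--     # all cards share the first card's suit
--     if any(card[0] != cards[0][0] for card in cards):
--         return False
--     # count each rank once, in a dictionary instead of a 15-slot array
--     counts = {}
--     for card in cards:
--         r = mappings.get(card[1])
--         if r is None:
--             return False
--         counts[r] = counts.get(r, 0) + 1
--     if level not in mappings:
--         return False
--     mL = mappings[level]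
--     # every present rank must occur exactly twice ...
--     if any(v != 2 for v in counts.values()):
--         return False
--     # ... and the pairs must form one contiguous run, where the level's
--     # rank slot is skipped (ranks on both sides of it count as adjacent)
--     pos = [r if r < mL else r - 1 for r in counts]
--     return max(pos) - min(pos) == len(pos) - 1
-- ===== Notes on version B (the rewrite author's own statement) =====
-- stated objective: alternative
-- what changed: The 15-slot count array, the pop of the level slot and the pop(0)/is_start state machine are replaced by a rank-counter dictionary checked with 'every count == 2' plus a contiguity test max(pos)-min(pos) == len(pos)-1 over level-shifted positions.
import Mathlib
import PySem

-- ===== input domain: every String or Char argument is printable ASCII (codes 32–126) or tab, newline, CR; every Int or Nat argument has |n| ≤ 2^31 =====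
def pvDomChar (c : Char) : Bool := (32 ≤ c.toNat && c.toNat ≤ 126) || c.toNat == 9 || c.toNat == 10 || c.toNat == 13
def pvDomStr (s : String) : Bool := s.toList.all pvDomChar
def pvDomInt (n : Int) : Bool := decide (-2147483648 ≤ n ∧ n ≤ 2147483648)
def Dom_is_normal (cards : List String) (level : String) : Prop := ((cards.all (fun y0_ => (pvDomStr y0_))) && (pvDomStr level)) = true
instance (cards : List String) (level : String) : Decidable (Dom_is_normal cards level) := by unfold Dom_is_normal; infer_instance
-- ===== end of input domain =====

-- B replaces A's 15-slot count array, slot-pop and pop(0) state machine by a rank-counter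
-- dictionary plus a contiguity check (max-min = size-1 over level-shifted positions); same cost, plainer.


-- ===== PORT A =====
-- The rank dict both Pythons define literally.  Its keys are the 13 single-character strings,
-- ported as Char; see pvLevelRank? for the `level`-keyed lookup.
def pvMappings : PySem.Dict Char Int :=
  PySem.Dict.ofList [('2',2),('3',3),('4',4),('5',5),('6',6),('7',7),('8',8),('9',9),('0',10),('J',11),('Q',12),('K',13),('A',14)]

-- card[1] membership test + lookup in `mappings` (shared by both ports, as in both Pythons);
-- none = `card[1] not in mappings` (or IndexError on a short card — excluded by Pre_is_normal)
def pvRank? (card : String) : Option Int :=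
  match PySem.Str.pyGet? card 1 with
  | none => none
  | some c => pvMappings.get? c

-- `level not in mappings` / `mappings[level]`: a key of the dict equals `level` exactly when
-- level is that single character (exact; shared by both ports)
def pvLevelRank? (level : String) : Option Int :=
  match level.toList with
  | [c] => pvMappings.get? c
  | _ => none

-- card_numbers[mappings[card[1]]] += 1
def pvStepA (ns : List Int) (r : Int) : List Int :=
  PySem.List.pySetD ns r (PySem.List.pyGetD ns r 0 + 1)

-- the counting for-loop of A (early `return False` = none)
def pvCountLoopA : List Int → List String → Option (List Int)
  | nums, [] => some nums
  | nums, card :: rest =>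
    match pvRank? card with
    | none => none
    | some r => pvCountLoopA (pvStepA nums r) rest

-- A's while-loop over card_numbers with its is_start state (0/1/2); after the loop:
-- `if is_start: return True` else fall through to `return False`
def pvTractorLoop : List Int → Nat → Bool
  | [], s => s != 0
  | n :: rest, s =>
    if ¬ (n = 0 ∨ n = 2) then false
    else if n = 2 ∧ s = 0 then pvTractorLoop rest 1
    else if n = 0 ∧ s = 1 then pvTractorLoop rest 2
    else if n ≠ 0 ∧ s > 1 then false
    else pvTractorLoop rest s

def is_normal (cards : List String) (level : String) : Bool :=
  if cards.length < 1 then false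
  else if cards.length = 1 then true
  else if cards.length = 2 then PySem.List.pyGetD cards 0 "" == PySem.List.pyGetD cards 1 ""
  else if cards.length % 2 ≠ 0 then false
  else if cards.any (fun card => PySem.Str.isIn level card || PySem.Str.isIn "jo" card || PySem.Str.isIn "Jo" card) then false
  else if cards.any (fun card => PySem.Str.pyGet? card 0 != PySem.Str.pyGet? (PySem.List.pyGetD cards 0 "") 0) then false
  else
    match pvCountLoopA (List.replicate 15 0) cards with
    | none => false
    | some nums =>
      match pvLevelRank? level with
      | none => false
      | some mL =>
        match PySem.List.pop? nums mL with
        | none => false  -- unreachable: 2 ≤ mL ≤ 14 < len nums = 15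
        | some (_, rest) => pvTractorLoop rest 0

-- ===== PORT B =====
-- counts[r] = counts.get(r, 0) + 1
def pvStepB (d : PySem.Dict Int Int) (r : Int) : PySem.Dict Int Int :=
  d.insert r (d.getD r 0 + 1)

-- B's counting for-loop over the dict (early `return False` = none)
def pvCountLoopB : PySem.Dict Int Int → List String → Option (PySem.Dict Int Int)
  | d, [] => some d
  | d, card :: rest =>
    match pvRank? card with
    | none => none
    | some r => pvCountLoopB (pvStepB d r) rest

-- r if r < mL else r - 1
def pvShift (mL r : Int) : Int := if r < mL then r else r - 1

def is_normal_alt (cards : List String) (level : String) : Bool :=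
  if cards.length < 1 then false
  else if cards.length = 1 then true
  else if cards.length = 2 then PySem.List.pyGetD cards 0 "" == PySem.List.pyGetD cards 1 ""
  else if cards.length % 2 ≠ 0 then false
  else if cards.any (fun card => PySem.Str.isIn level card || PySem.Str.isIn "jo" card || PySem.Str.isIn "Jo" card) then false
  else if cards.any (fun card => PySem.Str.pyGet? card 0 != PySem.Str.pyGet? (PySem.List.pyGetD cards 0 "") 0) then false
  else
    match pvCountLoopB PySem.Dict.empty cards with
    | none => false
    | some counts =>
      match pvLevelRank? level with
      | none => false
      | some mL =>
        if counts.values.any (fun v => v != 2) then false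
        else
          match PySem.List.max? (counts.keys.map (fun r => pvShift mL r)) (fun x => x),
                PySem.List.min? (counts.keys.map (fun r => pvShift mL r)) (fun x => x) with
          | some M, some m => M - m == PySem.List.len (counts.keys.map (fun r => pvShift mL r)) - 1
          | _, _ => false  -- unreachable: the keys list is nonempty (cards is)

-- ===== PRECONDITION & SPEC =====
-- the 13 rank characters (keys of `mappings`), used only to state Pre_
def pvRankChars : List Char := ['2','3','4','5','6','7','8','9','0','J','Q','K','A']

-- Pre_ excludes exactly the inputs on which A raises IndexError (a tractor-length hand whose
-- first suit-loop offender is an empty card, or, after the suit loop passes, whose first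
-- counting-loop offender is a one-character card); B raises the same IndexError there.
def Pre_is_normal (cards : List String) (level : String) : Prop :=
  ¬ (3 ≤ cards.length ∧ cards.length % 2 = 0 ∧
     (∀ card ∈ cards, (PySem.Str.isIn level card || PySem.Str.isIn "jo" card || PySem.Str.isIn "Jo" card) = false) ∧
     ((∃ i < cards.length, (cards.getD i "").toList = [] ∧
         ∀ j < i, (cards.getD j "").toList ≠ [] ∧
           (cards.getD j "").toList.head? = (cards.getD 0 "").toList.head?)
      ∨ ((∀ card ∈ cards, card.toList ≠ [] ∧ card.toList.head? = (cards.getD 0 "").toList.head?) ∧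
         ∃ i < cards.length, (cards.getD i "").toList.length = 1 ∧
           ∀ j < i, 2 ≤ (cards.getD j "").toList.length ∧
             (cards.getD j "").toList.getD 1 ' ' ∈ pvRankChars)))
instance (cards : List String) (level : String) : Decidable (Pre_is_normal cards level) := by
  unfold Pre_is_normal; infer_instance

def pvWitness_is_normal : List String × String := (["S3", "S3", "S4", "S4"], "2")

def Spec_is_normal (cards : List String) (level : String) (out : Bool) : Prop := out = is_normal_alt cards level
instance (cards : List String) (level : String) (out : Bool) : Decidable (Spec_is_normal cards level out) := by
  unfold Spec_is_normal; infer_instance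

-- ===== CLAIM (what is proved, stated in full; the proofs are below) =====
def Claim_equal_is_normal : Prop := ∀ (cards : List String) (level : String), Dom_is_normal cards level → Pre_is_normal cards level → Spec_is_normal cards level (is_normal cards level)

-- ===== LEMMAS AND PROOFS =====

-- the list of mapped ranks of the cards (proof-side mirror of both counting loops)
def pvRanks? : List String → Option (List Int)
  | [] => some []
  | card :: rest =>
    match pvRank? card with
    | none => none
    | some r => (pvRanks? rest).map (r :: ·)

lemma pvCountLoopA_eq (cards : List String) : ∀ nums,
    pvCountLoopA nums cards = (pvRanks? cards).map (fun rs => rs.foldl pvStepA nums) := by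
  induction cards with
  | nil => intro nums; rfl
  | cons card rest ih =>
    intro nums
    cases hr : pvRank? card with
    | none => simp [pvCountLoopA, pvRanks?, hr]
    | some r =>
      simp only [pvCountLoopA, pvRanks?, hr, ih]
      cases pvRanks? rest <;> simp

lemma pvCountLoopB_eq (cards : List String) : ∀ d,
    pvCountLoopB d cards = (pvRanks? cards).map (fun rs => rs.foldl pvStepB d) := by
  induction cards with
  | nil => intro d; rfl
  | cons card rest ih =>
    intro d
    cases hr : pvRank? card with
    | none => simp [pvCountLoopB, pvRanks?, hr]
    | some r =>
      simp only [pvCountLoopB, pvRanks?, hr, ih]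
      cases pvRanks? rest <;> simp

lemma pvRanks?_mem {cards : List String} {rs : List Int} (h : pvRanks? cards = some rs) :
    ∀ r ∈ rs, ∃ card ∈ cards, pvRank? card = some r := by
  induction cards generalizing rs with
  | nil => simp only [pvRanks?, Option.some_inj] at h; subst h; simp
  | cons card rest ih =>
    simp only [pvRanks?] at h
    cases hc : pvRank? card with
    | none => rw [hc] at h; exact absurd h (by simp)
    | some r0 =>
      rw [hc] at h
      cases ht : pvRanks? rest with
      | none => rw [ht] at h; exact absurd h (by simp)
      | some ts =>
        rw [ht] at h
        simp only [Option.map_some, Option.some_inj] at h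
        subst h
        intro r hr
        rcases List.mem_cons.1 hr with rfl | hm
        · exact ⟨card, by simp, hc⟩
        · obtain ⟨c', hc', hf⟩ := ih ht r hm
          exact ⟨c', by simp [hc'], hf⟩

lemma pvRanks?_length {cards : List String} {rs : List Int} (h : pvRanks? cards = some rs) :
    rs.length = cards.length := by
  induction cards generalizing rs with
  | nil => simp only [pvRanks?, Option.some_inj] at h; subst h; rfl
  | cons card rest ih =>
    simp only [pvRanks?] at h
    cases hc : pvRank? card with
    | none => rw [hc] at h; exact absurd h (by simp)
    | some r0 =>
      rw [hc] at h
      cases ht : pvRanks? rest with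
      | none => rw [ht] at h; exact absurd h (by simp)
      | some ts =>
        rw [ht] at h
        simp only [Option.map_some, Option.some_inj] at h
        subst h
        simp [ih ht]

set_option maxHeartbeats 1600000 in
lemma pvMappings_mk : pvMappings = PySem.Dict.mk
    [('2',2),('3',3),('4',4),('5',5),('6',6),('7',7),('8',8),('9',9),('0',10),('J',11),('Q',12),('K',13),('A',14)] := by
  decide

lemma pvMappings_get {c : Char} {r : Int} (h : pvMappings.get? c = some r) :
    (c = '2' ∧ r = 2) ∨ (c = '3' ∧ r = 3) ∨ (c = '4' ∧ r = 4) ∨ (c = '5' ∧ r = 5) ∨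
    (c = '6' ∧ r = 6) ∨ (c = '7' ∧ r = 7) ∨ (c = '8' ∧ r = 8) ∨ (c = '9' ∧ r = 9) ∨
    (c = '0' ∧ r = 10) ∨ (c = 'J' ∧ r = 11) ∨ (c = 'Q' ∧ r = 12) ∨ (c = 'K' ∧ r = 13) ∨
    (c = 'A' ∧ r = 14) := by
  rw [pvMappings_mk] at h
  have h2 := PySem.Dict.mem_items_of_get?_eq_some _ h
  simpa only [PySem.Dict.items, List.mem_cons, List.not_mem_nil, or_false,
    Prod.mk.injEq] using h2

lemma pvMappings_range {c : Char} {r : Int} (h : pvMappings.get? c = some r) : 2 ≤ r ∧ r ≤ 14 := by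
  rcases pvMappings_get h with
    ⟨_,rfl⟩|⟨_,rfl⟩|⟨_,rfl⟩|⟨_,rfl⟩|⟨_,rfl⟩|⟨_,rfl⟩|⟨_,rfl⟩|⟨_,rfl⟩|⟨_,rfl⟩|⟨_,rfl⟩|⟨_,rfl⟩|⟨_,rfl⟩|⟨_,rfl⟩ <;>
    norm_num

lemma pvMappings_inj {c c' : Char} {r : Int} (h : pvMappings.get? c = some r)
    (h' : pvMappings.get? c' = some r) : c = c' := by
  rcases pvMappings_get h with
    ⟨rfl,rfl⟩|⟨rfl,rfl⟩|⟨rfl,rfl⟩|⟨rfl,rfl⟩|⟨rfl,rfl⟩|⟨rfl,rfl⟩|⟨rfl,rfl⟩|⟨rfl,rfl⟩|⟨rfl,rfl⟩|⟨rfl,rfl⟩|⟨rfl,rfl⟩|⟨rfl,rfl⟩|⟨rfl,rfl⟩ <;>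
  rcases pvMappings_get h' with
    ⟨rfl,hv⟩|⟨rfl,hv⟩|⟨rfl,hv⟩|⟨rfl,hv⟩|⟨rfl,hv⟩|⟨rfl,hv⟩|⟨rfl,hv⟩|⟨rfl,hv⟩|⟨rfl,hv⟩|⟨rfl,hv⟩|⟨rfl,hv⟩|⟨rfl,hv⟩|⟨rfl,hv⟩ <;>
  first | rfl | omega

lemma pvRank?_range {card : String} {r : Int} (h : pvRank? card = some r) : 2 ≤ r ∧ r ≤ 14 := by
  unfold pvRank? at h
  cases hg : PySem.Str.pyGet? card 1 with
  | none => rw [hg] at h; exact absurd h (by simp)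
  | some c => rw [hg] at h; exact pvMappings_range h

lemma pvLevelRank?_range {level : String} {mL : Int} (h : pvLevelRank? level = some mL) :
    2 ≤ mL ∧ mL ≤ 14 := by
  unfold pvLevelRank? at h
  split at h
  · exact pvMappings_range h
  · exact absurd h (by simp)

lemma pvRank?_ne_level {card level : String} {r mL : Int}
    (hs : PySem.Str.isIn level card = false)
    (h : pvRank? card = some r) (hl : pvLevelRank? level = some mL) : r ≠ mL := by
  intro heq
  subst heq
  unfold pvRank? at h
  cases hg : PySem.Str.pyGet? card 1 with
  | none => rw [hg] at h; exact absurd h (by simp)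
  | some c =>
    rw [hg] at h
    unfold pvLevelRank? at hl
    split at hl
    · rename_i c' hlvl
      have hcc : c = c' := pvMappings_inj h hl
      subst hcc
      have hmem : c ∈ card.toList := by
        rw [show (1:Int) = ((1:Nat):Int) from rfl, PySem.Str.pyGet?_natCast] at hg
        exact List.mem_of_getElem? hg
      have : PySem.Str.isIn level card = true := by
        rw [PySem.Str.isIn_iff_infix, hlvl]
        exact (List.singleton_infix_iff c card.toList).2 hmem
      rw [hs] at this
      exact absurd this (by simp)
    · exact absurd hl (by simp)

lemma pvStepA_length (ns : List Int) (r : Int) : (pvStepA ns r).length = ns.length := by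
  unfold pvStepA PySem.List.pySetD PySem.List.pySet?
  cases PySem.List.pyIdx? ns.length r <;> simp

lemma pvStepA_getD (ns : List Int) (r : Int) (h0 : 0 ≤ r) (h1 : r < (ns.length : Int)) (i : Nat) :
    (pvStepA ns r).getD i 0 = ns.getD i 0 + (if (i : Int) = r then 1 else 0) := by
  have hidx : PySem.List.pyIdx? ns.length r = some r.toNat := by
    unfold PySem.List.pyIdx?; rw [if_pos h0, if_pos h1]
  have hrn : r.toNat < ns.length := by omega
  unfold pvStepA PySem.List.pySetD PySem.List.pySet?
  rw [hidx]
  simp only [Option.map_some, Option.getD_some]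
  rw [PySem.List.pyGetD_eq_getElem ns 0 h0 h1]
  rw [List.getD_eq_getElem?_getD, List.getD_eq_getElem?_getD, List.getElem?_set]
  by_cases hir : r.toNat = i
  · subst hir
    have hcond : ((r.toNat : Nat) : Int) = r := by omega
    simp [hcond, hrn]
  · have hcond : ¬ (((i : Nat) : Int) = r) := by omega
    simp [hir, hcond]

lemma pvFold_counts (rs : List Int) : ∀ ns : List Int, (∀ r ∈ rs, 0 ≤ r ∧ r < (ns.length : Int)) →
    (rs.foldl pvStepA ns).length = ns.length ∧
      ∀ i : Nat, (rs.foldl pvStepA ns).getD i 0 = ns.getD i 0 + (rs.count (i : Int) : Int) := by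
  induction rs with
  | nil => intro ns _; simp
  | cons r t ih =>
    intro ns h
    have hr := h r (List.mem_cons_self)
    have ht : ∀ x ∈ t, 0 ≤ x ∧ x < ((pvStepA ns r).length : Int) := by
      rw [pvStepA_length]; intro x hx; exact h x (List.mem_cons_of_mem _ hx)
    obtain ⟨hl, hg⟩ := ih (pvStepA ns r) ht
    constructor
    · rw [List.foldl_cons, hl, pvStepA_length]
    · intro i
      rw [List.foldl_cons, hg i, pvStepA_getD ns r hr.1 hr.2 i, List.count_cons]
      simp only [beq_iff_eq]
      split_ifs <;> push_cast <;> omega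

lemma pvStepB_foldl (rs : List Int) :
    rs.foldl pvStepB PySem.Dict.empty = PySem.Dict.counter rs := by
  have : pvStepB = fun (d : PySem.Dict Int Int) x => d.insert x (d.getD x 0 + 1) := rfl
  rw [this, PySem.Dict.foldl_insert_getD_add_one_eq_counter]

-- ---- the is_start state machine, characterised ----

lemma pvRun2_iff (q : List Int) : pvTractorLoop q 2 = true ↔ ∀ x ∈ q, x = 0 := by
  induction q with
  | nil => simp [pvTractorLoop]
  | cons n t ih =>
    by_cases h0 : n = 0
    · subst h0
      have hstep : pvTractorLoop (0 :: t) 2 = pvTractorLoop t 2 := by simp [pvTractorLoop]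
      rw [hstep, ih]
      simp
    · by_cases h2 : n = 2
      · subst h2
        have hstep : pvTractorLoop (2 :: t) 2 = false := by simp [pvTractorLoop]
        rw [hstep]
        simp only [Bool.false_eq_true, false_iff]
        intro h
        exact absurd (h 2 (List.mem_cons_self)) (by norm_num)
      · have hstep : pvTractorLoop (n :: t) 2 = false := by
          simp [pvTractorLoop, h0, h2]
        rw [hstep]
        simp only [Bool.false_eq_true, false_iff]
        intro h
        exact absurd (h n (List.mem_cons_self)) h0

lemma pvRun1_iff (q : List Int) : pvTractorLoop q 1 = true ↔
    ∃ b c, q = List.replicate b 2 ++ List.replicate c 0 := by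
  induction q with
  | nil =>
    simp only [pvTractorLoop]
    constructor
    · intro _; exact ⟨0, 0, rfl⟩
    · intro _; rfl
  | cons n t ih =>
    by_cases h0 : n = 0
    · subst h0
      have hstep : pvTractorLoop (0 :: t) 1 = pvTractorLoop t 2 := by simp [pvTractorLoop]
      rw [hstep, pvRun2_iff]
      constructor
      · intro h
        refine ⟨0, t.length + 1, ?_⟩
        simp only [List.replicate_zero, List.nil_append, List.replicate_succ, List.cons.injEq]
        exact ⟨trivial, List.eq_replicate_of_mem h⟩
      · rintro ⟨b, c, heq⟩ x hx
        cases b with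
        | succ b' =>
          simp only [List.replicate_succ, List.cons_append, List.cons.injEq] at heq
          exact absurd heq.1 (by norm_num)
        | zero =>
          cases c with
          | zero => simp at heq
          | succ c' =>
            simp only [List.replicate_zero, List.nil_append, List.replicate_succ,
              List.cons.injEq] at heq
            rw [heq.2] at hx
            exact List.eq_of_mem_replicate hx
    · by_cases h2 : n = 2
      · subst h2
        have hstep : pvTractorLoop (2 :: t) 1 = pvTractorLoop t 1 := by simp [pvTractorLoop]
        rw [hstep, ih]
        constructor
        · rintro ⟨b, c, heq⟩
          exact ⟨b + 1, c, by rw [heq]; rfl⟩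
        · rintro ⟨b, c, heq⟩
          cases b with
          | zero =>
            cases c with
            | zero => simp at heq
            | succ c' =>
              simp only [List.replicate_zero, List.nil_append, List.replicate_succ,
                List.cons.injEq] at heq
              exact absurd heq.1 (by norm_num)
          | succ b' =>
            simp only [List.replicate_succ, List.cons_append, List.cons.injEq] at heq
            exact ⟨b', c, by rw [heq.2]⟩
      · have hstep : pvTractorLoop (n :: t) 1 = false := by
          simp [pvTractorLoop, h0, h2]
        rw [hstep]
        simp only [Bool.false_eq_true, false_iff]
        rintro ⟨b, c, heq⟩
        cases b with
        | zero =>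
          cases c with
          | zero => simp at heq
          | succ c' =>
            simp only [List.replicate_zero, List.nil_append, List.replicate_succ,
              List.cons.injEq] at heq
            exact h0 heq.1
        | succ b' =>
          simp only [List.replicate_succ, List.cons_append, List.cons.injEq] at heq
          exact h2 heq.1

lemma pvRun0_iff (q : List Int) : pvTractorLoop q 0 = true ↔
    ∃ a b c, q = List.replicate a 0 ++ List.replicate (b + 1) 2 ++ List.replicate c 0 := by
  induction q with
  | nil =>
    simp only [pvTractorLoop]
    constructor
    · intro h; exact absurd h (by decide)
    · rintro ⟨a, b, c, heq⟩
      have hlenc := congrArg List.length heq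
      simp only [List.length_nil, List.length_append, List.length_replicate] at hlenc
      omega
  | cons n t ih =>
    by_cases h0 : n = 0
    · subst h0
      have hstep : pvTractorLoop (0 :: t) 0 = pvTractorLoop t 0 := by simp [pvTractorLoop]
      rw [hstep, ih]
      constructor
      · rintro ⟨a, b, c, heq⟩
        exact ⟨a + 1, b, c, by rw [heq]; rfl⟩
      · rintro ⟨a, b, c, heq⟩
        cases a with
        | zero =>
          simp only [List.replicate_zero, List.nil_append, List.replicate_succ,
            List.cons_append, List.cons.injEq] at heq
          exact absurd heq.1 (by norm_num)
        | succ a' =>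
          simp only [List.replicate_succ, List.cons_append, List.cons.injEq] at heq
          exact ⟨a', b, c, by rw [heq.2]; rfl⟩
    · by_cases h2 : n = 2
      · subst h2
        have hstep : pvTractorLoop (2 :: t) 0 = pvTractorLoop t 1 := by simp [pvTractorLoop]
        rw [hstep, pvRun1_iff]
        constructor
        · rintro ⟨b, c, heq⟩
          exact ⟨0, b, c, by rw [heq]; rfl⟩
        · rintro ⟨a, b, c, heq⟩
          cases a with
          | succ a' =>
            simp only [List.replicate_succ, List.cons_append, List.cons.injEq] at heq
            exact absurd heq.1 (by norm_num)
          | zero =>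
            simp only [List.replicate_zero, List.nil_append, List.replicate_succ,
              List.cons_append, List.cons.injEq] at heq
            exact ⟨b, c, heq.2⟩
      · have hstep : pvTractorLoop (n :: t) 0 = false := by
          simp [pvTractorLoop, h0, h2]
        rw [hstep]
        simp only [Bool.false_eq_true, false_iff]
        rintro ⟨a, b, c, heq⟩
        cases a with
        | zero =>
          simp only [List.replicate_zero, List.nil_append, List.replicate_succ,
            List.cons_append, List.cons.injEq] at heq
          exact h2 heq.1
        | succ a' =>
          simp only [List.replicate_succ, List.cons_append, List.cons.injEq] at heq
          exact h0 heq.1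

-- getD of the three-block shape
lemma pvGetD_decomp (a b c p : Nat) :
    (List.replicate a (0:Int) ++ List.replicate b 2 ++ List.replicate c 0).getD p 0 =
      if a ≤ p ∧ p < a + b then 2 else 0 := by
  rw [List.getD_eq_getElem?_getD]
  simp only [List.getElem?_append, List.getElem?_replicate, List.length_replicate,
    List.length_append]
  split_ifs <;> simp only [Option.getD_some, Option.getD_none] <;> omega

lemma pvEq_decomp (q : List Int) (a b c : Nat) (hlen : q.length = a + b + c)
    (h : ∀ p : Nat, p < a + b + c → q.getD p 0 = if a ≤ p ∧ p < a + b then 2 else 0) :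
    q = List.replicate a 0 ++ List.replicate b 2 ++ List.replicate c 0 := by
  apply List.ext_getElem (by simp; omega)
  intro i h1 h2
  have hi : i < a + b + c := by omega
  have := h i hi
  rw [List.getD_eq_getElem (q) 0 h1] at this
  rw [this]
  have := pvGetD_decomp a b c i
  rw [List.getD_eq_getElem _ 0 h2] at this
  rw [this]

-- the positions of the present ranks, with the level slot closed
def pvPos (rs : List Int) (mL : Int) : List Int :=
  (PySem.Set.ofList rs).map (fun r => pvShift mL r)

-- ---- the central bridge: the state machine accepts iff every present rank occurs twice and
-- ---- the shifted positions form one contiguous run ----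
lemma pvBridge (rs : List Int) (mL : Int) (q : List Int) (M m : Int)
    (hmL : 2 ≤ mL ∧ mL ≤ 14)
    (hrs : ∀ r ∈ rs, (2 ≤ r ∧ r ≤ 14) ∧ r ≠ mL)
    (hlen : q.length = 14)
    (hq : ∀ p : Nat, p < 14 → q.getD p 0 = (rs.count (if (p:Int) < mL then (p:Int) else (p:Int) + 1) : Int))
    (hM : M ∈ pvPos rs mL) (hMmax : ∀ y ∈ pvPos rs mL, y ≤ M)
    (hm : m ∈ pvPos rs mL) (hmmin : ∀ y ∈ pvPos rs mL, m ≤ y) :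
    pvTractorLoop q 0 = true ↔
      ((∀ r ∈ rs, (rs.count r : Int) = 2) ∧ M - m = ((pvPos rs mL).length : Int) - 1) := by
  have hus : ∀ x : Int, pvShift mL (if x < mL then x else x + 1) = x := by
    intro x; unfold pvShift; split_ifs <;> omega
  have hsu : ∀ r : Int, r ≠ mL →
      (if pvShift mL r < mL then pvShift mL r else pvShift mL r + 1) = r := by
    intro r hr; unfold pvShift; split_ifs <;> omega
  have hrange : ∀ x ∈ pvPos rs mL, 1 ≤ x ∧ x ≤ 13 := by
    intro x hx
    obtain ⟨r, hr, rfl⟩ := List.mem_map.1 hx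
    have hr' := hrs r ((PySem.Set.mem_ofList rs r).1 hr)
    unfold pvShift; split_ifs <;> omega
  have hposmem : ∀ x : Int, x ∈ pvPos rs mL ↔
      (0 ≤ x ∧ x < 14 ∧ rs.count (if x < mL then x else x + 1) ≠ 0) := by
    intro x
    constructor
    · intro hx
      obtain ⟨r, hr, rfl⟩ := List.mem_map.1 hx
      have hmem : r ∈ rs := (PySem.Set.mem_ofList rs r).1 hr
      have hr' := hrs r hmem
      have hb := hrange _ hx
      refine ⟨by omega, by omega, ?_⟩
      rw [hsu r hr'.2]
      have := List.count_pos_iff.2 hmem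
      omega
    · rintro ⟨hx0, hx14, hc⟩
      have hmem : (if x < mL then x else x + 1) ∈ rs := List.count_pos_iff.1 (by omega)
      exact List.mem_map.2 ⟨_, (PySem.Set.mem_ofList rs _).2 hmem, hus x⟩
  have hnodup : (pvPos rs mL).Nodup := by
    apply List.Nodup.map_on _ (PySem.Set.nodup_ofList rs)
    intro x hx y hy hxy
    have hx' := (hrs x ((PySem.Set.mem_ofList rs x).1 hx)).2
    have hy' := (hrs y ((PySem.Set.mem_ofList rs y).1 hy)).2
    have := hsu x hx'
    have := hsu y hy'
    rw [← hsu x hx', ← hsu y hy', hxy]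
  have hq' : ∀ p : Nat, p < 14 → (q.getD p 0 ≠ 0 ↔ (p:Int) ∈ pvPos rs mL) := by
    intro p hp
    rw [hq p hp, hposmem]
    constructor
    · intro h; exact ⟨by omega, by omega, by exact_mod_cast h⟩
    · rintro ⟨_, _, h⟩; exact_mod_cast h
  constructor
  · intro hrun
    rw [pvRun0_iff] at hrun
    obtain ⟨a, b, c, hdq⟩ := hrun
    have hsum : a + (b + 1) + c = 14 := by
      have := congrArg List.length hdq
      simp at this
      omega
    have hent : ∀ p : Nat, p < 14 → q.getD p 0 = if a ≤ p ∧ p < a + (b + 1) then 2 else 0 := by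
      intro p hp; rw [hdq]; exact pvGetD_decomp a (b+1) c p
    have hposiff : ∀ x : Int, x ∈ pvPos rs mL ↔ ((a:Int) ≤ x ∧ x < (a:Int) + (b:Int) + 1) := by
      intro x
      constructor
      · intro hx
        have hb := hrange x hx
        have hx' : ((x.toNat : Nat) : Int) = x := by omega
        have hlt : x.toNat < 14 := by omega
        have h1 : q.getD x.toNat 0 ≠ 0 := by rw [hq' x.toNat hlt, hx']; exact hx
        rw [hent x.toNat hlt] at h1
        split_ifs at h1 with hcond
        · omega
        · omega
      · rintro ⟨hx1, hx2⟩
        have hx0 : 0 ≤ x := le_trans (by positivity) hx1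
        have hlt : x.toNat < 14 := by omega
        have hx' : ((x.toNat : Nat) : Int) = x := by omega
        have h1 : q.getD x.toNat 0 = 2 := by
          rw [hent x.toNat hlt]
          rw [if_pos (by omega)]
        have := (hq' x.toNat hlt).1 (by rw [h1]; norm_num)
        rwa [hx'] at this
    constructor
    · intro r hr
      have hr' := hrs r hr
      have hxpos : pvShift mL r ∈ pvPos rs mL :=
        List.mem_map.2 ⟨r, (PySem.Set.mem_ofList rs r).2 hr, rfl⟩
      have hb := hrange _ hxpos
      have hlt : (pvShift mL r).toNat < 14 := by omega
      have hx' : (((pvShift mL r).toNat : Nat) : Int) = pvShift mL r := by omega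
      have h1 := hent (pvShift mL r).toNat hlt
      have h2 := hq (pvShift mL r).toNat hlt
      rw [hx', hsu r hr'.2] at h2
      have hne0 : q.getD (pvShift mL r).toNat 0 ≠ 0 := by
        rw [h2]
        have := List.count_pos_iff.2 hr
        omega
      rw [h1] at h2 hne0
      split_ifs at h2 hne0
      · omega
      · omega
    · have hMeq : M = (a:Int) + b := by
        have h1 := (hposiff M).1 hM
        have h2 : ((a:Int) + b) ∈ pvPos rs mL := (hposiff _).2 ⟨by omega, by omega⟩
        have := hMmax _ h2
        omega
      have hmeq : m = (a:Int) := by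
        have h1 := (hposiff m).1 hm
        have h2 : ((a:Int)) ∈ pvPos rs mL := (hposiff _).2 ⟨by omega, by omega⟩
        have := hmmin _ h2
        omega
      have hfin : (pvPos rs mL).toFinset = Finset.Icc (a:Int) ((a:Int) + b) := by
        apply Finset.ext
        intro x
        rw [List.mem_toFinset, hposiff, Finset.mem_Icc]
        omega
      have hcard : (pvPos rs mL).length = b + 1 := by
        rw [← List.toFinset_card_of_nodup hnodup, hfin, Int.card_Icc]
        omega
      rw [hMeq, hmeq, hcard]
      push_cast
      ring
  · rintro ⟨hC, hMm⟩
    have hmM : m ≤ M := hmmin M hM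
    have hbm := hrange m hm
    have hbM := hrange M hM
    have hsub : (pvPos rs mL).toFinset ⊆ Finset.Icc m M := by
      intro x hx
      rw [List.mem_toFinset] at hx
      rw [Finset.mem_Icc]
      exact ⟨hmmin x hx, hMmax x hx⟩
    have hcard1 : (pvPos rs mL).toFinset.card = (pvPos rs mL).length :=
      List.toFinset_card_of_nodup hnodup
    have hfin : (pvPos rs mL).toFinset = Finset.Icc m M := by
      apply Finset.eq_of_subset_of_card_le hsub
      rw [hcard1, Int.card_Icc]
      omega
    have hposiff : ∀ x : Int, x ∈ pvPos rs mL ↔ (m ≤ x ∧ x ≤ M) := by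
      intro x
      rw [← List.mem_toFinset, hfin, Finset.mem_Icc]
    rw [pvRun0_iff]
    refine ⟨m.toNat, (M - m).toNat, (13 - M).toNat, ?_⟩
    apply pvEq_decomp q m.toNat ((M - m).toNat + 1) (13 - M).toNat (by omega)
    intro p hp
    rw [hq p (by omega)]
    by_cases hin : m.toNat ≤ p ∧ p < m.toNat + ((M - m).toNat + 1)
    · rw [if_pos hin]
      have hpin : (p : Int) ∈ pvPos rs mL := (hposiff _).2 ⟨by omega, by omega⟩
      have := (hposmem _).1 hpin
      have hmem : (if (p:Int) < mL then (p:Int) else (p:Int) + 1) ∈ rs :=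
        List.count_pos_iff.1 (by omega)
      exact hC _ hmem
    · rw [if_neg hin]
      by_contra hne
      have hcnt : rs.count (if (p:Int) < mL then (p:Int) else (p:Int) + 1) ≠ 0 := by
        intro hz; rw [hz] at hne; exact hne rfl
      have hpin : (p : Int) ∈ pvPos rs mL :=
        (hposmem _).2 ⟨by omega, by omega, hcnt⟩
      have := (hposiff _).1 hpin
      omega

-- ===== VERDICT (by name: the statement is the Claim_ definition above) =====
theorem is_normal_spec : Claim_equal_is_normal := by
  unfold Claim_equal_is_normal
  intro cards level _hdom _hpre
  unfold Spec_is_normal is_normal is_normal_alt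
  split_ifs with h1 h2 h3 h4 h5 h6
  · rfl
  · rfl
  · rfl
  · rfl
  · rfl
  · rfl
  -- core case: length ≥ 3, even, no level/joker substrings, suits already equal
  · have h5' : cards.any (fun card => PySem.Str.isIn level card || PySem.Str.isIn "jo" card ||
        PySem.Str.isIn "Jo" card) = false := Bool.eq_false_iff.2 h5
    rw [List.any_eq_false] at h5'
    have hsubs : ∀ card ∈ cards, PySem.Str.isIn level card = false := by
      intro card hc
      have := h5' card hc
      simp only [Bool.or_eq_true, not_or, Bool.not_eq_true] at this
      exact this.1.1
    cases hranks : pvRanks? cards with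
    | none => simp [pvCountLoopA_eq, pvCountLoopB_eq, hranks]
    | some rs =>
      simp only [pvCountLoopA_eq, pvCountLoopB_eq, hranks, Option.map_some]
      cases hlev : pvLevelRank? level with
      | none => rfl
      | some mL =>
        try simp only []
        have hmLr := pvLevelRank?_range hlev
        have hrsf : ∀ r ∈ rs, (2 ≤ r ∧ r ≤ 14) ∧ r ≠ mL := by
          intro r hr
          obtain ⟨card, hcmem, hcr⟩ := pvRanks?_mem hranks r hr
          exact ⟨pvRank?_range hcr, pvRank?_ne_level (hsubs card hcmem) hcr hlev⟩
        set nums := List.foldl pvStepA (List.replicate 15 0) rs with hnums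
        have hfold := pvFold_counts rs (List.replicate 15 0)
          (by intro r hr; have := (hrsf r hr).1; simp only [List.length_replicate]; omega)
        have hlenN : nums.length = 15 := by rw [hnums]; simpa using hfold.1
        have hgetN : ∀ i : Nat, nums.getD i 0 = (rs.count (i:Int) : Int) := by
          intro i
          rw [hnums, hfold.2 i, List.getD_eq_getElem?_getD, List.getElem?_replicate]
          split_ifs <;> simp
        have hrs_ne : rs ≠ [] := by
          have hL := pvRanks?_length hranks
          intro hnil
          rw [hnil] at hL
          simp at hL
          omega
        have hmlt : mL.toNat < nums.length := by omega
        have hcast : mL = ((mL.toNat : Nat) : Int) := by omega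
        cases hpop : PySem.List.pop? nums mL with
        | none =>
          rw [hcast, PySem.List.pop?_natCast nums mL.toNat hmlt] at hpop
          exact absurd hpop (by simp)
        | some pr =>
          obtain ⟨x, q⟩ := pr
          rw [hcast, PySem.List.pop?_natCast nums mL.toNat hmlt] at hpop
          simp only [Option.some_inj, Prod.mk.injEq] at hpop
          have hq_eq : q = nums.eraseIdx mL.toNat := hpop.2.symm
          try simp only []
          have hqlen : q.length = 14 := by
            rw [hq_eq, List.length_eraseIdx, if_pos (by omega)]
            omega
          have hq : ∀ p : Nat, p < 14 →
              q.getD p 0 = (rs.count (if (p:Int) < mL then (p:Int) else (p:Int) + 1) : Int) := by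
            intro p hp
            have hple : p < q.length := by omega
            rw [hq_eq] at hple ⊢
            rw [List.getD_eq_getElem _ 0 hple, List.getElem_eraseIdx]
            by_cases hpm : p < mL.toNat
            · rw [dif_pos hpm, if_pos (show ((p:Nat):Int) < mL by omega)]
              rw [← List.getD_eq_getElem nums 0 (show p < nums.length by omega)]
              exact hgetN p
            · rw [dif_neg hpm, if_neg (show ¬ (((p:Nat):Int) < mL) by omega)]
              rw [← List.getD_eq_getElem nums 0 (show p + 1 < nums.length by omega)]
              rw [hgetN (p+1)]
              norm_num
          have hBc : List.foldl pvStepB PySem.Dict.empty rs = PySem.Dict.counter rs :=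
            pvStepB_foldl rs
          have hvals : (PySem.Dict.counter rs).values =
              (PySem.Set.ofList rs).map (fun k => ((rs.count k : Int))) := by
            rw [PySem.Dict.values_eq_map_keys _ (PySem.Dict.nodup_keys_counter rs) 0,
              PySem.Dict.keys_counter]
            exact List.map_congr_left (fun k _ => PySem.Dict.getD_counter rs k)
          rw [hBc, PySem.Dict.keys_counter, hvals]
          have hpos_ne : (PySem.Set.ofList rs).map (fun r => pvShift mL r) ≠ [] := by
            intro hnil
            obtain ⟨r, hr⟩ := List.exists_mem_of_ne_nil rs hrs_ne
            have h1 : r ∈ PySem.Set.ofList rs := (PySem.Set.mem_ofList rs r).2 hr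
            have h2 := List.mem_map_of_mem (f := fun r => pvShift mL r) h1
            rw [hnil] at h2
            exact List.not_mem_nil h2
          cases hmax : PySem.List.max? ((PySem.Set.ofList rs).map (fun r => pvShift mL r))
              (fun x => x) with
          | none => exact absurd ((PySem.List.max?_eq_none_iff _ _).1 hmax) hpos_ne
          | some M =>
            cases hmin : PySem.List.min? ((PySem.Set.ofList rs).map (fun r => pvShift mL r))
                (fun x => x) with
            | none => exact absurd ((PySem.List.min?_eq_none_iff _ _).1 hmin) hpos_ne
            | some m =>
              have hb := pvBridge rs mL q M m ⟨hmLr.1, hmLr.2⟩ hrsf hqlen hq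
                (PySem.List.max?_mem hmax) (fun y hy => PySem.List.max?_isMax hmax y hy)
                (PySem.List.min?_mem hmin) (fun y hy => PySem.List.min?_isMin hmin y hy)
              simp only [pvPos] at hb
              by_cases hC : ∀ r ∈ rs, (rs.count r : Int) = 2
              · have hany : ((PySem.Set.ofList rs).map
                    (fun k => ((rs.count k : Int)))).any (fun v => v != 2) = false := by
                  rw [List.any_eq_false]
                  intro v hv
                  obtain ⟨k, hk, rfl⟩ := List.mem_map.1 hv
                  simp [hC k ((PySem.Set.mem_ofList rs k).1 hk)]
                rw [hany, if_neg (by simp)]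
                rw [Bool.eq_iff_iff, hb]
                constructor
                · rintro ⟨-, h2⟩
                  simp only [beq_iff_eq, PySem.List.len_eq]
                  exact h2
                · intro hEq
                  simp only [beq_iff_eq, PySem.List.len_eq] at hEq
                  exact ⟨hC, hEq⟩
              · have hany : ((PySem.Set.ofList rs).map
                    (fun k => ((rs.count k : Int)))).any (fun v => v != 2) = true := by
                  simp only [not_forall] at hC
                  obtain ⟨r, hr, hne2⟩ := hC
                  rw [List.any_eq_true]
                  refine ⟨(rs.count r : Int),
                    List.mem_map_of_mem ((PySem.Set.mem_ofList rs r).2 hr), ?_⟩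
                  simp only [bne_iff_ne, ne_eq]
                  exact hne2
                rw [hany, if_pos rfl]
                cases hrun : pvTractorLoop q 0 with
                | false => rfl
                | true => exact absurd (hb.1 hrun).1 hC
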